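-- pv_equiv track=rewrite | github.com/yooncoderhere/2025_yooncoder | 프로그래머스/0/120861. 캐릭터의 좌표/캐릭터의 좌표.py | solution
-- ===== SOURCE A (Python) =====
-- def solution(keyinput, board):
--     x, y = 0, 0  # 초기 위치
--     max_x, max_y = board[0] // 2, board[1] // 2  # 이동 가능한 최대 범위
--
--     # 방향 매핑
--     move = {"up": (0, 1), "down": (0, -1), "left": (-1, 0), "right": (1, 0)}
--
--     for key in keyinput:
--         dx, dy = move[key]
--         new_x, new_y = x + dx, y + dy  # 이동 후 좌표
--
--         # 보드 범위를 벗어나지 않도록 조정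
--         if -max_x <= new_x <= max_x and -max_y <= new_y <= max_y:
--             x, y = new_x, new_y
--
--     return [x, y]
-- ===== SOURCE B (Python) =====
-- def _walk(deltas, limit):
--     # one axis: unit steps clamped to [-limit, limit]
--     pos = 0
--     for d in deltas:
--         pos = max(-limit, min(limit, pos + d))
--     return pos
--
--
-- def solution(keyinput, board):
--     move = {"up": (0, 1), "down": (0, -1), "left": (-1, 0), "right": (1, 0)}
--     steps = [move[key] for key in keyinput]  # KeyError on an unknown key, as in the task
--     x = _walk([dx for dx, dy in steps if dx], board[0] // 2)
--     y = _walk([dy for dx, dy in steps if dy], board[1] // 2)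
--     return [x, y]
-- ===== Notes on version B (the rewrite author's own statement) =====
-- stated objective: alternative
-- what changed: A runs one fold over the (x,y) pair testing both axes' bounds at every step; B maps the keys to deltas once and then runs two independent per-axis passes, each clamping its coordinate with min/max.
-- outside the precondition, e.g. on solution(['up'], [-2, 3]): A returns [0, 0], B returns [0, 1]
import Mathlib
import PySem

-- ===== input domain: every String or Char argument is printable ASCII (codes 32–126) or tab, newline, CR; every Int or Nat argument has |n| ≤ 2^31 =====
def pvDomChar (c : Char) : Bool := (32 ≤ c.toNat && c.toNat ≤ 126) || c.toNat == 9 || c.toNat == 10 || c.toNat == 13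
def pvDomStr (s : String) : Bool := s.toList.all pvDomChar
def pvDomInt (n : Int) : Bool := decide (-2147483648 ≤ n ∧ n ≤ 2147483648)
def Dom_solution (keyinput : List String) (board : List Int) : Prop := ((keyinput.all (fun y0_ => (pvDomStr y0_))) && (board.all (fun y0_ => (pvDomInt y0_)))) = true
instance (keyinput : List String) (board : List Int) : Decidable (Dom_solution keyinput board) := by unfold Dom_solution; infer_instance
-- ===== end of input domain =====

-- B replaces A's single fold over the (x,y) pair (two-axis bounds test each step) by one delta-mapping
-- pass plus two independent per-axis clamping passes; an alternative decomposition, not claimed faster.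


-- ===== PORT A =====
-- the literal dict {"up": (0,1), "down": (0,-1), "left": (-1,0), "right": (1,0)}
def pvMoveA : PySem.Dict String (Int × Int) :=
  PySem.Dict.ofList [("up", (0, 1)), ("down", (0, -1)), ("left", (-1, 0)), ("right", (1, 0))]

-- A's loop body: dx, dy = move[key]; accept (new_x, new_y) iff it passes the two-axis bounds test
-- (a 'none' lookup is Python's KeyError, excluded by Pre_; the port keeps the state there)
def pvStepA (mx my : Int) (p : Int × Int) (key : String) : Int × Int :=
  match pvMoveA.get? key with
  | none => p
  | some d =>
    let nx := p.1 + d.1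
    let ny := p.2 + d.2
    if -mx ≤ nx ∧ nx ≤ mx ∧ -my ≤ ny ∧ ny ≤ my then (nx, ny) else p

def solution (keyinput : List String) (board : List Int) : List Int :=
  match PySem.List.pyGet? board 0, PySem.List.pyGet? board 1 with
  | some b0, some b1 =>
      let mx := PySem.Int.floordiv b0 2
      let my := PySem.Int.floordiv b1 2
      let p := keyinput.foldl (pvStepA mx my) (0, 0)
      [p.1, p.2]
  | _, _ => []  -- board[0] / board[1] raised IndexError: excluded by Pre_

-- ===== PORT B =====
def pvMoveB : PySem.Dict String (Int × Int) :=
  PySem.Dict.ofList [("up", (0, 1)), ("down", (0, -1)), ("left", (-1, 0)), ("right", (1, 0))]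

-- move[key] of Source B's comprehension ('none' is Python's KeyError, excluded by Pre_)
def pvDelta (key : String) : Int × Int := (pvMoveB.get? key).getD (0, 0)

-- Source B's _walk: one axis, unit steps clamped to [-limit, limit]
def pvWalk (deltas : List Int) (limit : Int) : Int :=
  deltas.foldl (fun pos d => max (-limit) (min limit (pos + d))) 0

def solution_alt (keyinput : List String) (board : List Int) : List Int :=
  let steps := keyinput.map pvDelta
  let x := pvWalk ((steps.filter (fun p => !(p.1 == 0))).map Prod.fst)
                  (PySem.Int.floordiv (PySem.List.pyGetD board 0 0) 2)
  let y := pvWalk ((steps.filter (fun p => !(p.2 == 0))).map Prod.snd)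
                  (PySem.Int.floordiv (PySem.List.pyGetD board 1 0) 2)
  [x, y]

-- ===== PRECONDITION & SPEC =====
-- Pre_ restricts to the task's natural domain: both board dimensions present and nonnegative, every key a
-- real direction. Outside it A raises (IndexError on a short board, KeyError on an unknown key), except on
-- a board with a negative dimension, where A's blanket [0,0] (its two-axis bounds test rejects every move)
-- is an accident of its implementation that a per-axis B does not reproduce.
def Pre_solution (keyinput : List String) (board : List Int) : Prop :=
  2 ≤ board.length ∧ 0 ≤ board.getD 0 0 ∧ 0 ≤ board.getD 1 0 ∧
  ∀ k ∈ keyinput, k = "up" ∨ k = "down" ∨ k = "left" ∨ k = "right"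

instance (keyinput : List String) (board : List Int) : Decidable (Pre_solution keyinput board) := by
  unfold Pre_solution; infer_instance

def pvWitness_solution : List String × List Int := (["up", "up", "left", "down"], [7, 5])

def Spec_solution (keyinput : List String) (board : List Int) (out : List Int) : Prop := out = solution_alt keyinput board
instance (keyinput : List String) (board : List Int) (out : List Int) : Decidable (Spec_solution keyinput board out) := by unfold Spec_solution; infer_instance

-- ===== CLAIM (what is proved, stated in full; the proofs are below) =====
def Claim_equal_solution : Prop := ∀ (keyinput : List String) (board : List Int), Dom_solution keyinput board → Pre_solution keyinput board → Spec_solution keyinput board (solution keyinput board)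

-- ===== LEMMAS AND PROOFS =====

-- A vertical key ((0,dy) with dy = ±1) moves only y, and A's accept-or-reject is min/max clamping.
lemma pv_stepA_vert (mx my x y dy : Int) (k : String) (hget : pvMoveA.get? k = some (0, dy))
    (hdy : dy = 1 ∨ dy = -1)
    (hmy : 0 ≤ my) (hx1 : -mx ≤ x) (hx2 : x ≤ mx) (hy1 : -my ≤ y) (hy2 : y ≤ my) :
    pvStepA mx my (x, y) k = (x, max (-my) (min my (y + dy))) := by
  simp only [pvStepA, hget]
  split_ifs with h
  · obtain ⟨h1, h2, h3, h4⟩ := h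
    simp only [Prod.mk.injEq]
    refine ⟨?_, ?_⟩ <;> first | trivial | omega
  · have h' : my < y + dy ∨ y + dy < -my := by
      by_contra hc
      push Not at hc
      exact h ⟨by omega, by omega, by omega, by omega⟩
    simp only [Prod.mk.injEq]
    rcases hdy with rfl | rfl <;> rcases h' with h' | h' <;>
      refine ⟨?_, ?_⟩ <;> first | trivial | omega

-- the symmetric fact for a horizontal key ((dx,0) with dx = ±1)
lemma pv_stepA_horiz (mx my x y dx : Int) (k : String) (hget : pvMoveA.get? k = some (dx, 0))
    (hdx : dx = 1 ∨ dx = -1)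
    (hmx : 0 ≤ mx) (hx1 : -mx ≤ x) (hx2 : x ≤ mx) (hy1 : -my ≤ y) (hy2 : y ≤ my) :
    pvStepA mx my (x, y) k = (max (-mx) (min mx (x + dx)), y) := by
  simp only [pvStepA, hget]
  split_ifs with h
  · obtain ⟨h1, h2, h3, h4⟩ := h
    simp only [Prod.mk.injEq]
    refine ⟨?_, ?_⟩ <;> first | trivial | omega
  · have h' : mx < x + dx ∨ x + dx < -mx := by
      by_contra hc
      push Not at hc
      exact h ⟨by omega, by omega, by omega, by omega⟩
    simp only [Prod.mk.injEq]
    rcases hdx with rfl | rfl <;> rcases h' with h' | h' <;>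
      refine ⟨?_, ?_⟩ <;> first | trivial | omega

-- A's single fold over the pair splits into B's two per-axis clamping folds, for nonnegative
-- half-ranges, valid keys and any start state inside the board.
lemma pv_loop_split (mx my : Int) (hmx : 0 ≤ mx) (hmy : 0 ≤ my)
    (keys : List String)
    (hk : ∀ k ∈ keys, k = "up" ∨ k = "down" ∨ k = "left" ∨ k = "right")
    (x y : Int) (hx1 : -mx ≤ x) (hx2 : x ≤ mx) (hy1 : -my ≤ y) (hy2 : y ≤ my) :
    keys.foldl (pvStepA mx my) (x, y) =
      ((((keys.map pvDelta).filter (fun p => !(p.1 == 0))).map Prod.fst).foldl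
         (fun pos d => max (-mx) (min mx (pos + d))) x,
       (((keys.map pvDelta).filter (fun p => !(p.2 == 0))).map Prod.snd).foldl
         (fun pos d => max (-my) (min my (pos + d))) y) := by
  induction keys generalizing x y with
  | nil => rfl
  | cons k ks ih =>
    have hks : ∀ k' ∈ ks, k' = "up" ∨ k' = "down" ∨ k' = "left" ∨ k' = "right" :=
      fun k' hm => hk k' (List.mem_cons_of_mem _ hm)
    rcases hk k List.mem_cons_self with rfl | rfl | rfl | rfl
    · rw [List.foldl_cons, pv_stepA_vert mx my x y 1 _ rfl (Or.inl rfl) hmy hx1 hx2 hy1 hy2]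
      have hd : pvDelta "up" = ((0 : Int), (1 : Int)) := rfl
      simp only [List.map_cons, hd, List.filter_cons]
      norm_num
      exact ih hks x _ hx1 hx2 (by omega) (by omega)
    · rw [List.foldl_cons, pv_stepA_vert mx my x y (-1) _ rfl (Or.inr rfl) hmy hx1 hx2 hy1 hy2]
      have hd : pvDelta "down" = ((0 : Int), (-1 : Int)) := rfl
      simp only [List.map_cons, hd, List.filter_cons]
      norm_num
      exact ih hks x _ hx1 hx2 (by omega) (by omega)
    · rw [List.foldl_cons, pv_stepA_horiz mx my x y (-1) _ rfl (Or.inr rfl) hmx hx1 hx2 hy1 hy2]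
      have hd : pvDelta "left" = ((-1 : Int), (0 : Int)) := rfl
      simp only [List.map_cons, hd, List.filter_cons]
      norm_num
      exact ih hks _ y (by omega) (by omega) hy1 hy2
    · rw [List.foldl_cons, pv_stepA_horiz mx my x y 1 _ rfl (Or.inl rfl) hmx hx1 hx2 hy1 hy2]
      have hd : pvDelta "right" = ((1 : Int), (0 : Int)) := rfl
      simp only [List.map_cons, hd, List.filter_cons]
      norm_num
      exact ih hks _ y (by omega) (by omega) hy1 hy2

-- ===== VERDICT (by name: the statement is the Claim_ definition above) =====
theorem solution_spec : Claim_equal_solution := by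
  intro keyinput board _hdom hpre
  obtain ⟨hlen, h0, h1, hkeys⟩ := hpre
  rcases board with _ | ⟨b0, rest0⟩
  · simp at hlen
  rcases rest0 with _ | ⟨b1, rest⟩
  · simp at hlen
  have hg0 : PySem.List.pyGet? (b0 :: b1 :: rest) (0 : Int) = some b0 := by simp [pysem]
  have hg1 : PySem.List.pyGet? (b0 :: b1 :: rest) (1 : Int) = some b1 := by simp [pysem]
  have hd0 : PySem.List.pyGetD (b0 :: b1 :: rest) (0 : Int) 0 = b0 := by simp [pysem]
  have hd1 : PySem.List.pyGetD (b0 :: b1 :: rest) (1 : Int) 0 = b1 := by simp [pysem]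
  have hb0 : (0 : Int) ≤ b0 := by simpa using h0
  have hb1 : (0 : Int) ≤ b1 := by simpa using h1
  have hmx : 0 ≤ PySem.Int.floordiv b0 2 := by
    rw [PySem.Int.floordiv_eq_ediv_of_pos (by norm_num)]
    exact Int.ediv_nonneg hb0 (by norm_num)
  have hmy : 0 ≤ PySem.Int.floordiv b1 2 := by
    rw [PySem.Int.floordiv_eq_ediv_of_pos (by norm_num)]
    exact Int.ediv_nonneg hb1 (by norm_num)
  unfold Spec_solution solution solution_alt pvWalk
  rw [hg0, hg1, hd0, hd1]
  dsimp only
  rw [pv_loop_split _ _ hmx hmy keyinput hkeys 0 0 (by omega) (by omega) (by omega) (by omega)]
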